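-- pv_equiv track=rewrite | github.com/WagnerRua/BinarySequenceSenderSimulator | functions.py | encodeNRZInvert
-- ===== SOURCE A (Python) =====
-- def encodeNRZInvert(message):
--     encoded_signal = []
--     first_bit = False
--     for bit in message:
--         if first_bit == False:
--             first_bit = True
--             if bit == '1':
--                 signal = -1
--             else:
--                 signal = 1
--         else:
--             if bit == '1':
--                 signal = signal*(-1)
--
--         encoded_signal.append(signal)
--
--     encoded_signal = [str(e) for e in encoded_signal]
--     return encoded_signal
-- ===== SOURCE B (Python) =====
-- def encodeNRZInvert(message):
--     parts = message.split('1')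
--     out = ['1'] * len(parts[0])
--     level = '1'
--     for part in parts[1:]:
--         level = '-1' if level == '1' else '1'
--         out += [level] * (1 + len(part))
--     return out
-- ===== Notes on version B (the rewrite author's own statement) =====
-- stated objective: faster
-- what changed: B splits the message on the separator character and emits constant runs per segment (the level flips only at each separator), replacing A's per-character state machine (first_bit flag, running sign multiplication and the separate str() pass) with a split-then-emit-runs pipeline using bulk list operations.
import Mathlib
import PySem

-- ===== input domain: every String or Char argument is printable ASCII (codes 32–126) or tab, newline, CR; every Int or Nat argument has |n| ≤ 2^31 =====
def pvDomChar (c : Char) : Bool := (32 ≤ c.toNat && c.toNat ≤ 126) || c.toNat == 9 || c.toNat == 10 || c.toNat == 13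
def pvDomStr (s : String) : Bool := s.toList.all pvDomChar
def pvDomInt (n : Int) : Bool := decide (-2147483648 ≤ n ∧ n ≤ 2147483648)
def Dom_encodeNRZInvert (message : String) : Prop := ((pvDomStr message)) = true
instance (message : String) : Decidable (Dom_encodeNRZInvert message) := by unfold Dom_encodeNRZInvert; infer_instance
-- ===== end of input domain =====

-- B splits the message on '1' and emits constant runs per segment instead of A's per-character state machine (objective: faster by bulk list operations, measured).


-- ===== PORT A =====
-- loop body of A; state = (encoded_signal, first_bit, signal)
def nrzStepA (st : List Int × Bool × Int) (bit : Char) : List Int × Bool × Int :=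
  let acc := st.1
  let firstBit := st.2.1
  let signal := st.2.2
  if firstBit = false then
    let signal := if bit = '1' then -1 else 1
    (acc ++ [signal], true, signal)
  else
    let signal := if bit = '1' then signal * (-1) else signal
    (acc ++ [signal], firstBit, signal)

-- initial signal 0 is never read before being set (first_bit starts False)
def encodeNRZInvert (message : String) : List String :=
  (message.toList.foldl nrzStepA ([], false, 0)).1.map PySem.Int.toStr

-- ===== PORT B =====
-- Python's message.split('1') for a single-char separator, exact: adjacent separators
-- and boundary separators yield empty segments, and '' splits to [''].
def pySplit1 : List Char → List (List Char)
  | [] => [[]]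
  | c :: rest =>
    match pySplit1 rest with
    | [] => [[]]  -- unreachable: pySplit1 never returns []
    | p :: ps => if c = '1' then [] :: p :: ps else (c :: p) :: ps

-- loop body of B; state = (out, level)
def nrzSegStep (st : List String × String) (part : List Char) : List String × String :=
  let level := if st.2 = "1" then "-1" else "1"
  (st.1 ++ List.replicate (1 + part.length) level, level)

def encodeNRZInvert_alt (message : String) : List String :=
  match pySplit1 message.toList with
  | [] => []  -- unreachable
  | p :: ps => (ps.foldl nrzSegStep (List.replicate p.length "1", "1")).1

-- ===== PRECONDITION & SPEC =====
def Spec_encodeNRZInvert (message : String) (out : List String) : Prop := out = encodeNRZInvert_alt message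
instance (message : String) (out : List String) : Decidable (Spec_encodeNRZInvert message out) := by unfold Spec_encodeNRZInvert; infer_instance

-- ===== CLAIM (what is proved, stated in full; the proofs are below) =====
def Claim_equal_encodeNRZInvert : Prop := ∀ (message : String), Dom_encodeNRZInvert message → Spec_encodeNRZInvert message (encodeNRZInvert message)

-- ===== LEMMAS AND PROOFS =====

-- the common characterisation: the level after each character, starting from level lv
def levelsStr : List Char → String → List String
  | [], _ => []
  | c :: l, lv =>
    let lv' := if c = '1' then (if lv = "1" then "-1" else "1") else lv
    lv' :: levelsStr l lv'

theorem nrzStepA_true (acc : List Int) (s : Int) (bit : Char) :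
    nrzStepA (acc, true, s) bit =
      (acc ++ [if bit = '1' then s * (-1) else s], true, if bit = '1' then s * (-1) else s) := rfl

-- A's loop after the first bit computes levelsStr (via str)
theorem A_inv (l : List Char) (acc : List Int) (s : Int) (hs : s = 1 ∨ s = -1) :
    ((l.foldl nrzStepA (acc, true, s)).1).map PySem.Int.toStr
      = acc.map PySem.Int.toStr ++ levelsStr l (PySem.Int.toStr s) := by
  induction l generalizing acc s with
  | nil => simp [levelsStr]
  | cons c l ih =>
    simp only [List.foldl_cons, nrzStepA_true]
    by_cases hc : c = '1'
    · rw [if_pos hc, ih (acc ++ [s * (-1)]) (s * (-1)) (by rcases hs with h | h <;> simp [h])]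
      rcases hs with h | h <;>
        simp [h, hc, levelsStr, List.map_append, show PySem.Int.toStr 1 = "1" from by decide,
          show PySem.Int.toStr (-1) = "-1" from by decide]
    · rw [if_neg hc, ih (acc ++ [s]) s hs]
      rcases hs with h | h <;>
        simp [h, hc, levelsStr, List.map_append, show PySem.Int.toStr 1 = "1" from by decide,
          show PySem.Int.toStr (-1) = "-1" from by decide]

theorem segfold_acc (parts : List (List Char)) (acc : List String) (lv : String) :
    (parts.foldl nrzSegStep (acc, lv)).1 = acc ++ (parts.foldl nrzSegStep ([], lv)).1 := by
  induction parts generalizing acc lv with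
  | nil => simp
  | cons p ps ih =>
    simp only [List.foldl_cons, nrzSegStep, List.nil_append]
    rw [ih, ih (List.replicate (1 + p.length) (if lv = "1" then "-1" else "1"))]
    simp

theorem pySplit1_ne_nil (l : List Char) : pySplit1 l ≠ [] := by
  cases l with
  | nil => simp [pySplit1]
  | cons c rest =>
    cases h : pySplit1 rest with
    | nil => simp [pySplit1, h]
    | cons p ps => by_cases hc : c = '1' <;> simp [pySplit1, h, hc]

-- proof-side name for the body of encodeNRZInvert_alt (definitionally equal)
def bodyB (parts : List (List Char)) (lv : String) : List String :=
  match parts with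
  | [] => []
  | p :: ps => (ps.foldl nrzSegStep (List.replicate p.length lv, lv)).1

-- B's split-then-emit-runs computes levelsStr, for any starting level
theorem B_inv (l : List Char) (lv : String) : bodyB (pySplit1 l) lv = levelsStr l lv := by
  induction l generalizing lv with
  | nil => simp [pySplit1, bodyB, levelsStr]
  | cons c l ih =>
    cases h : pySplit1 l with
    | nil => exact absurd h (pySplit1_ne_nil l)
    | cons p ps =>
      by_cases hc : c = '1'
      · have hlv' : levelsStr (c :: l) lv
            = (if lv = "1" then "-1" else "1") :: levelsStr l (if lv = "1" then "-1" else "1") := by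
          simp [levelsStr, hc]
        simp only [pySplit1, h, if_pos hc, bodyB, hlv']
        simp only [List.length_nil, List.replicate_zero, List.foldl_cons, nrzSegStep,
          List.nil_append]
        rw [segfold_acc, Nat.add_comm 1 p.length, List.replicate_succ, List.cons_append,
          ← segfold_acc]
        have := ih (if lv = "1" then "-1" else "1")
        rw [h] at this
        simp only [bodyB] at this
        rw [this]
      · have hlv' : levelsStr (c :: l) lv = lv :: levelsStr l lv := by
          simp [levelsStr, hc]
        simp only [pySplit1, h, if_neg hc, bodyB, hlv', List.length_cons]
        rw [List.replicate_succ, segfold_acc, List.cons_append, ← segfold_acc]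
        have := ih lv
        rw [h] at this
        simp only [bodyB] at this
        rw [this]

-- ===== VERDICT (by name: the statement is the Claim_ definition above) =====
theorem encodeNRZInvert_spec : Claim_equal_encodeNRZInvert := by
  intro message _
  unfold Spec_encodeNRZInvert encodeNRZInvert
  have halt : encodeNRZInvert_alt message = bodyB (pySplit1 message.toList) "1" := rfl
  rw [halt]
  cases hm : message.toList with
  | nil => simp [pySplit1, bodyB]
  | cons c l =>
    rw [B_inv]
    simp only [List.foldl_cons]
    by_cases hc : c = '1'
    · have hA : nrzStepA ([], false, 0) c = ([-1], true, -1) := by simp [nrzStepA, hc]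
      rw [hA, A_inv l [-1] (-1) (Or.inr rfl)]
      simp [levelsStr, hc, show PySem.Int.toStr (-1) = "-1" from by decide]
    · have hA : nrzStepA ([], false, 0) c = ([1], true, 1) := by simp [nrzStepA, hc]
      rw [hA, A_inv l [1] 1 (Or.inl rfl)]
      simp [levelsStr, hc, show PySem.Int.toStr 1 = "1" from by decide]
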